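-- pv_equiv track=rewrite | github.com/SyntaxLoFi/techPrototypeTwo | utils/opt_keys.py | resolve_opt_key
-- ===== SOURCE A (Python) =====
-- from typing import Mapping, Optional
--
-- def resolve_opt_key(strike_entry: Mapping, is_call: bool) -> str:
--     """
--     Given one strike's dictionary (e.g., chain[strike]), return the
--     subkey containing call/put quotes:
--       — try common variants: 'C','call','CALL','calls' or 'P','put','PUT','puts'
--       — fall back to 'C'/'P' if nothing matches so callers don't blow up
--     """
--     if not isinstance(strike_entry, Mapping):
--         return "C" if is_call else "P"
--     keys = tuple(strike_entry.keys())
--     if is_call: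
--         for k in ("C", "call", "CALL", "calls", "Calls", "CALLS"):
--             if k in keys:
--                 return k
--         return "C"
--     else:
--         for k in ("P", "put", "PUT", "puts", "Puts", "PUTS"):
--             if k in keys:
--                 return k
--         return "P"
-- ===== SOURCE B (Python) =====
-- from typing import Mapping
--
-- def resolve_opt_key(strike_entry, is_call):
--     variants = ("C", "call", "CALL", "calls", "Calls", "CALLS") if is_call \
--         else ("P", "put", "PUT", "puts", "Puts", "PUTS")
--     if not isinstance(strike_entry, Mapping):
--         return variants[0]
--     rank = {v: i for i, v in enumerate(variants)}
--     best = None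
--     for k in strike_entry:
--         r = rank.get(k)
--         if r is not None and (best is None or r < best):
--             best = r
--     return variants[best if best is not None else 0]
-- ===== Notes on version B (the rewrite author's own statement) =====
-- stated objective: alternative
-- what changed: Instead of scanning the candidate variants in priority order and testing each for membership in the dict's keys, B builds a variant->priority index once and makes a single pass over the dict's actual keys tracking the minimum-rank match, returning the variant of that rank (or the default variant if none matched).
import Mathlib
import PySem

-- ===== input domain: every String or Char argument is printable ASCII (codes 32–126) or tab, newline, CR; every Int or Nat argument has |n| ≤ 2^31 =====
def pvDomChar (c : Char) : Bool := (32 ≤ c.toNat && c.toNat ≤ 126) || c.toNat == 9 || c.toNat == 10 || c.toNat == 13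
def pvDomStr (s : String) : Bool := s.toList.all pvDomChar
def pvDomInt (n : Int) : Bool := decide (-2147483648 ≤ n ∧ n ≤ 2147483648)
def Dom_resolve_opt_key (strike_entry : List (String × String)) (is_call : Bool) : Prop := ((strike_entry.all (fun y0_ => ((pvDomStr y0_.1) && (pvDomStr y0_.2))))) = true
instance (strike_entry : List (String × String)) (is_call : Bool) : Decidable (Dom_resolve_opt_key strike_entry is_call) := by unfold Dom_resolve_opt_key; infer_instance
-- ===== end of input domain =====

-- B replaces A's candidate-by-candidate membership scan with one pass over the dict's
-- keys against a precomputed variant→priority index, tracking the minimum rank (objective: alternative).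

-- ===== PORT A =====
-- the 'for k in (…): if k in keys: return k' loop; default d is the post-loop return
def pvLoopA (keys : List String) : List String → String → String
  | [], d => d
  | k :: rest, d => if keys.contains k then k else pvLoopA keys rest d

def resolve_opt_key (strike_entry : List (String × String)) (is_call : Bool) : String :=
  -- the isinstance(strike_entry, Mapping) guard is always true under the type convention (dict → assoc list)
  let keys := strike_entry.map Prod.fst
  if is_call then
    pvLoopA keys ["C", "call", "CALL", "calls", "Calls", "CALLS"] "C"
  else
    pvLoopA keys ["P", "put", "PUT", "puts", "Puts", "PUTS"] "P"

-- ===== PORT B =====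
-- rank = {v: i for i, v in enumerate(variants)}
def pvRankOf (vs : List String) : PySem.Dict String Int :=
  (PySem.List.enumerate vs 0).foldl (fun d iv => d.insert iv.2 iv.1) PySem.Dict.empty

-- loop body: r = rank.get(k); if r is not None and (best is None or r < best): best = r
def pvStep (rank : PySem.Dict String Int) (best : Option Int) (kv : String × String) : Option Int :=
  match rank.get? kv.1 with
  | some r =>
      match best with
      | none => some r
      | some b => if r < b then some r else some b
  | none => best

def resolve_opt_key_alt (strike_entry : List (String × String)) (is_call : Bool) : String :=
  let vs := if is_call then ["C", "call", "CALL", "calls", "Calls", "CALLS"]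
            else ["P", "put", "PUT", "puts", "Puts", "PUTS"]
  -- the isinstance guard is always true under the type convention
  let rank := pvRankOf vs
  let best : Option Int := strike_entry.foldl (pvStep rank) none
  -- variants[best if best is not None else 0]: the index is 0 or a rank 0..5, always in range
  PySem.List.pyGetD vs (best.getD 0) ""

-- ===== PRECONDITION & SPEC =====
def Spec_resolve_opt_key (strike_entry : List (String × String)) (is_call : Bool) (out : String) : Prop := out = resolve_opt_key_alt strike_entry is_call
instance (strike_entry : List (String × String)) (is_call : Bool) (out : String) : Decidable (Spec_resolve_opt_key strike_entry is_call out) := by unfold Spec_resolve_opt_key; infer_instance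

-- ===== CLAIM (what is proved, stated in full; the proofs are below) =====
def Claim_equal_resolve_opt_key : Prop := ∀ (strike_entry : List (String × String)) (is_call : Bool), Dom_resolve_opt_key strike_entry is_call → Spec_resolve_opt_key strike_entry is_call (resolve_opt_key strike_entry is_call)

-- ===== LEMMAS AND PROOFS =====

-- the min-tracking step of B's fold, keyed only by the looked-up rank
def pvMinStep (b : Option Int) (r : Int) : Option Int :=
  match b with
  | none => some r
  | some x => if r < x then some r else some x

lemma pvStep_eq (rank : PySem.Dict String Int) (b : Option Int) (kv : String × String) :
    pvStep rank b kv = match rank.get? kv.1 with | some r => pvMinStep b r | none => b := by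
  unfold pvStep pvMinStep; rfl

lemma pvFoldMin_some (t : List Int) (b : Int) :
    t.foldl pvMinStep (some b) = some (t.foldl min b) := by
  induction t generalizing b with
  | nil => rfl
  | cons a t ih =>
      simp only [List.foldl_cons, pvMinStep]
      split_ifs with h
      · rw [ih, show min b a = a by omega]
      · rw [ih, show min b a = b by omega]

lemma pvFoldMin_eq_min? (rs : List Int) : rs.foldl pvMinStep none = rs.min? := by
  cases rs with
  | nil => rfl
  | cons a t =>
      simp only [List.foldl_cons, pvMinStep]
      rw [pvFoldMin_some]
      rfl

lemma pvFoldMin_eq_some (rs : List Int) (m : Int) (hm : m ∈ rs) (hle : ∀ x ∈ rs, m ≤ x) :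
    rs.foldl pvMinStep none = some m := by
  rw [pvFoldMin_eq_min?, List.min?_eq_some_iff]
  exact ⟨hm, hle⟩

-- one call/put side of the claim, generic in the six (distinct) variant strings
lemma pvSide (v0 v1 v2 v3 v4 v5 : String) (f : String → Option Int)
    (hf : ∀ k, f k =
      if v0 == k then some 0 else if v1 == k then some 1 else if v2 == k then some 2
      else if v3 == k then some 3 else if v4 == k then some 4 else if v5 == k then some 5
      else none)
    (hnd : ([v0, v1, v2, v3, v4, v5] : List String).Nodup)
    (keys : List String) :
    pvLoopA keys [v0, v1, v2, v3, v4, v5] v0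
      = PySem.List.pyGetD [v0, v1, v2, v3, v4, v5]
          (((keys.filterMap f).foldl pvMinStep none).getD 0) "" := by
  simp only [List.nodup_cons, List.mem_cons, List.not_mem_nil, List.nodup_nil, not_or, or_false,
    and_true] at hnd
  obtain ⟨⟨h01, h02, h03, h04, h05⟩, ⟨h12, h13, h14, h15⟩, ⟨h23, h24, h25⟩, ⟨h34, h35⟩, h45, -⟩ := hnd
  by_cases c0 : v0 ∈ keys
  · have hm : (0 : Int) ∈ keys.filterMap f :=
      List.mem_filterMap.2 ⟨v0, c0, by simp [hf]⟩
    have hb : ∀ x ∈ keys.filterMap f, (0 : Int) ≤ x := by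
      intro x hx
      obtain ⟨k, hk, hfk⟩ := List.mem_filterMap.1 hx
      rw [hf] at hfk
      clear hf hx
      split_ifs at hfk <;> simp_all <;> omega
    rw [pvFoldMin_eq_some _ 0 hm hb,
        show PySem.List.pyGetD [v0, v1, v2, v3, v4, v5] ((some ((0 : Int))).getD 0) "" = v0 from rfl]
    simp [pvLoopA, c0]
  by_cases c1 : v1 ∈ keys
  · have hm : (1 : Int) ∈ keys.filterMap f :=
      List.mem_filterMap.2 ⟨v1, c1, by simp [hf, h01]⟩
    have hb : ∀ x ∈ keys.filterMap f, (1 : Int) ≤ x := by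
      intro x hx
      obtain ⟨k, hk, hfk⟩ := List.mem_filterMap.1 hx
      rw [hf] at hfk
      clear hf hx
      split_ifs at hfk <;> simp_all <;> omega
    rw [pvFoldMin_eq_some _ 1 hm hb,
        show PySem.List.pyGetD [v0, v1, v2, v3, v4, v5] ((some ((1 : Int))).getD 0) "" = v1 from rfl]
    simp [pvLoopA, c0, c1]
  by_cases c2 : v2 ∈ keys
  · have hm : (2 : Int) ∈ keys.filterMap f :=
      List.mem_filterMap.2 ⟨v2, c2, by simp [hf, h02, h12]⟩
    have hb : ∀ x ∈ keys.filterMap f, (2 : Int) ≤ x := by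
      intro x hx
      obtain ⟨k, hk, hfk⟩ := List.mem_filterMap.1 hx
      rw [hf] at hfk
      clear hf hx
      split_ifs at hfk <;> simp_all <;> omega
    rw [pvFoldMin_eq_some _ 2 hm hb,
        show PySem.List.pyGetD [v0, v1, v2, v3, v4, v5] ((some ((2 : Int))).getD 0) "" = v2 from rfl]
    simp [pvLoopA, c0, c1, c2]
  by_cases c3 : v3 ∈ keys
  · have hm : (3 : Int) ∈ keys.filterMap f :=
      List.mem_filterMap.2 ⟨v3, c3, by simp [hf, h03, h13, h23]⟩
    have hb : ∀ x ∈ keys.filterMap f, (3 : Int) ≤ x := by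
      intro x hx
      obtain ⟨k, hk, hfk⟩ := List.mem_filterMap.1 hx
      rw [hf] at hfk
      clear hf hx
      split_ifs at hfk <;> simp_all <;> omega
    rw [pvFoldMin_eq_some _ 3 hm hb,
        show PySem.List.pyGetD [v0, v1, v2, v3, v4, v5] ((some ((3 : Int))).getD 0) "" = v3 from rfl]
    simp [pvLoopA, c0, c1, c2, c3]
  by_cases c4 : v4 ∈ keys
  · have hm : (4 : Int) ∈ keys.filterMap f :=
      List.mem_filterMap.2 ⟨v4, c4, by simp [hf, h04, h14, h24, h34]⟩
    have hb : ∀ x ∈ keys.filterMap f, (4 : Int) ≤ x := by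
      intro x hx
      obtain ⟨k, hk, hfk⟩ := List.mem_filterMap.1 hx
      rw [hf] at hfk
      clear hf hx
      split_ifs at hfk <;> simp_all <;> omega
    rw [pvFoldMin_eq_some _ 4 hm hb,
        show PySem.List.pyGetD [v0, v1, v2, v3, v4, v5] ((some ((4 : Int))).getD 0) "" = v4 from rfl]
    simp [pvLoopA, c0, c1, c2, c3, c4]
  by_cases c5 : v5 ∈ keys
  · have hm : (5 : Int) ∈ keys.filterMap f :=
      List.mem_filterMap.2 ⟨v5, c5, by simp [hf, h05, h15, h25, h35, h45]⟩
    have hb : ∀ x ∈ keys.filterMap f, (5 : Int) ≤ x := by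
      intro x hx
      obtain ⟨k, hk, hfk⟩ := List.mem_filterMap.1 hx
      rw [hf] at hfk
      clear hf hx
      split_ifs at hfk <;> simp_all
    rw [pvFoldMin_eq_some _ 5 hm hb,
        show PySem.List.pyGetD [v0, v1, v2, v3, v4, v5] ((some ((5 : Int))).getD 0) "" = v5 from rfl]
    simp [pvLoopA, c0, c1, c2, c3, c4, c5]
  have hnil : keys.filterMap f = [] := by
    rw [List.filterMap_eq_nil_iff]
    intro k hk
    rw [hf]
    clear hf
    split_ifs <;> simp_all
  rw [hnil,
      show PySem.List.pyGetD [v0, v1, v2, v3, v4, v5] ((([] : List Int).foldl pvMinStep none).getD 0) "" = v0 from rfl]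
  simp [pvLoopA, c0, c1, c2, c3, c4, c5]

-- B's fold over the dict entries equals the min-fold over the ranks of the keys
lemma pvFold_entries (rank : PySem.Dict String Int) (f : String → Option Int)
    (hrank : ∀ k, rank.get? k = f k) (entries : List (String × String)) (acc : Option Int) :
    entries.foldl (pvStep rank) acc
      = ((entries.map Prod.fst).filterMap f).foldl pvMinStep acc := by
  induction entries generalizing acc with
  | nil => rfl
  | cons kv t ih =>
      simp only [List.foldl_cons, List.map_cons, List.filterMap_cons, pvStep_eq, hrank]
      cases f kv.1 with
      | none => exact ih acc
      | some r => simp only [List.foldl_cons]; exact ih _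

lemma pvRank_call : ∀ k, (pvRankOf ["C", "call", "CALL", "calls", "Calls", "CALLS"]).get? k =
    if "C" == k then some 0 else if "call" == k then some 1 else if "CALL" == k then some 2
    else if "calls" == k then some 3 else if "Calls" == k then some 4 else if "CALLS" == k then some 5
    else none := by
  intro k
  have h : pvRankOf ["C", "call", "CALL", "calls", "Calls", "CALLS"]
      = PySem.Dict.mk [("C", 0), ("call", 1), ("CALL", 2), ("calls", 3), ("Calls", 4), ("CALLS", 5)] := by rfl
  rw [h]
  simp only [PySem.Dict.get?, List.find?]
  split_ifs <;> simp only [Bool.not_eq_true] at * <;> simp only [*] <;> rfl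

lemma pvRank_put : ∀ k, (pvRankOf ["P", "put", "PUT", "puts", "Puts", "PUTS"]).get? k =
    if "P" == k then some 0 else if "put" == k then some 1 else if "PUT" == k then some 2
    else if "puts" == k then some 3 else if "Puts" == k then some 4 else if "PUTS" == k then some 5
    else none := by
  intro k
  have h : pvRankOf ["P", "put", "PUT", "puts", "Puts", "PUTS"]
      = PySem.Dict.mk [("P", 0), ("put", 1), ("PUT", 2), ("puts", 3), ("Puts", 4), ("PUTS", 5)] := by rfl
  rw [h]
  simp only [PySem.Dict.get?, List.find?]
  split_ifs <;> simp only [Bool.not_eq_true] at * <;> simp only [*] <;> rfl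

-- ===== VERDICT (by name: the statement is the Claim_ definition above) =====
theorem resolve_opt_key_spec : Claim_equal_resolve_opt_key := by
  intro strike_entry is_call _
  unfold Spec_resolve_opt_key resolve_opt_key resolve_opt_key_alt
  cases is_call with
  | true =>
      simp only [reduceIte]
      rw [pvFold_entries _ _ pvRank_call]
      exact pvSide "C" "call" "CALL" "calls" "Calls" "CALLS" _ (fun _ => rfl) (by decide) _
  | false =>
      simp only [Bool.false_eq_true, reduceIte]
      rw [pvFold_entries _ _ pvRank_put]
      exact pvSide "P" "put" "PUT" "puts" "Puts" "PUTS" _ (fun _ => rfl) (by decide) _
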